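-- pv_equiv track=rewrite | github.com/jacklenzotti/picasso | picasso/slice.py | _gaps_to_splits
-- ===== SOURCE A (Python) =====
-- def _gaps_to_splits(gaps, total_size):
--     """Convert gap positions to split ranges (content regions between gaps).
--     Returns list of (start, end) for each content strip."""
--     splits = []
--     prev_end = 0
--     for gap_start, gap_end in gaps:
--         if gap_start > prev_end:
--             splits.append((prev_end, gap_start))
--         prev_end = gap_end
--     if prev_end < total_size:
--         splits.append((prev_end, total_size))
--     return splits
-- ===== SOURCE B (Python) =====
-- def _gaps_to_splits(gaps, total_size):
--     """Convert gap positions to split ranges (content regions between gaps).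
--     Returns list of (start, end) for each content strip."""
--     starts = [0] + [gap_end for _, gap_end in gaps]
--     ends = [gap_start for gap_start, _ in gaps] + [total_size]
--     return [(s, e) for s, e in zip(starts, ends) if e > s]
-- ===== Notes on version B (the rewrite author's own statement) =====
-- stated objective: alternative
-- what changed: Replaces the stateful prev_end loop with a shifted-zip decomposition: boundary lists [0]+gap_ends and gap_starts+[total_size] are zipped and filtered by e > s, with no mutable state.
import Mathlib
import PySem

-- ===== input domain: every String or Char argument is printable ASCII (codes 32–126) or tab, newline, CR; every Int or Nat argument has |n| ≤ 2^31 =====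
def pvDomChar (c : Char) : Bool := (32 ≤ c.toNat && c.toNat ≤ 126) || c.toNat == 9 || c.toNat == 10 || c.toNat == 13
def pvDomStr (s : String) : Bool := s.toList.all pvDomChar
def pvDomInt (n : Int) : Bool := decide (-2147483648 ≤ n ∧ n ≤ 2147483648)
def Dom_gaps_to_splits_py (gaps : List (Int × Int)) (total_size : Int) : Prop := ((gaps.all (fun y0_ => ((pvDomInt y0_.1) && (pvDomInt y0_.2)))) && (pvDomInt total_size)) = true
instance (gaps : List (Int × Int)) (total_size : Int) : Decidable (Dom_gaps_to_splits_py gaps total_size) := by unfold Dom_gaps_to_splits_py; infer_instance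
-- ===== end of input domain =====

-- B: shifted-zip decomposition of the boundary pairs instead of A's stateful prev_end loop (alternative, same O(n) cost).


-- ===== PORT A =====
def gaps_to_splits_py (gaps : List (Int × Int)) (total_size : Int) : List (Int × Int) :=
  let st := gaps.foldl (fun (st : List (Int × Int) × Int) (g : Int × Int) =>
      (if g.1 > st.2 then st.1 ++ [(st.2, g.1)] else st.1, g.2)) ([], 0)
  if st.2 < total_size then st.1 ++ [(st.2, total_size)] else st.1

-- ===== PORT B =====
def gaps_to_splits_py_alt (gaps : List (Int × Int)) (total_size : Int) : List (Int × Int) :=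
  let starts := 0 :: gaps.map (fun g => g.2)
  let ends := gaps.map (fun g => g.1) ++ [total_size]
  (starts.zip ends).filter (fun p => p.2 > p.1)

-- ===== PRECONDITION & SPEC =====
def Spec_gaps_to_splits_py (gaps : List (Int × Int)) (total_size : Int) (out : List (Int × Int)) : Prop := out = gaps_to_splits_py_alt gaps total_size
instance (gaps : List (Int × Int)) (total_size : Int) (out : List (Int × Int)) : Decidable (Spec_gaps_to_splits_py gaps total_size out) := by unfold Spec_gaps_to_splits_py; infer_instance

-- ===== CLAIM (what is proved, stated in full; the proofs are below) =====
def Claim_equal_gaps_to_splits_py : Prop := ∀ (gaps : List (Int × Int)) (total_size : Int), Dom_gaps_to_splits_py gaps total_size → Spec_gaps_to_splits_py gaps total_size (gaps_to_splits_py gaps total_size)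

-- ===== LEMMAS AND PROOFS =====

lemma gts_main (gaps : List (Int × Int)) (total_size p : Int) (acc : List (Int × Int)) :
    (let st := gaps.foldl (fun (st : List (Int × Int) × Int) (g : Int × Int) =>
        (if g.1 > st.2 then st.1 ++ [(st.2, g.1)] else st.1, g.2)) (acc, p)
     if st.2 < total_size then st.1 ++ [(st.2, total_size)] else st.1)
    = acc ++ ((p :: gaps.map (fun g => g.2)).zip (gaps.map (fun g => g.1) ++ [total_size])).filter
        (fun q => q.2 > q.1) := by
  induction gaps generalizing p acc with
  | nil =>
    by_cases h : p < total_size <;>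
      simp [h]
  | cons g rest ih =>
    simp only [List.foldl_cons, List.map_cons, List.cons_append, List.zip_cons_cons]
    rw [ih]
    by_cases h : g.1 > p <;>
      simp [h, List.append_assoc]

-- ===== VERDICT (by name: the statement is the Claim_ definition above) =====
theorem gaps_to_splits_py_spec : Claim_equal_gaps_to_splits_py := by
  intro gaps total_size _
  show gaps_to_splits_py gaps total_size = gaps_to_splits_py_alt gaps total_size
  unfold gaps_to_splits_py gaps_to_splits_py_alt
  simpa using gts_main gaps total_size 0 []
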